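-- pv_equiv track=rewrite | github.com/pminervini/neural-schema-regularization | hyper/masking/util.py | get_embedding_lengths
-- ===== SOURCE A (Python) =====
-- from collections import Counter
--
-- def get_embedding_lengths(triples, cutpoints, embedding_lengths):
--     entity_seq = [s for (s, _, _) in triples] + [o for (_, _, o) in triples]
--
--     cutpoints = sorted(cutpoints)
--
--     entity_lengths = {}
--     entity_counts = sorted(Counter(entity_seq).items(), key=lambda entry: entry[1])
--
--     for (entity, count) in entity_counts:
--         idx = next((cutpoints.index(c) for c in cutpoints if c > count), len(cutpoints))
--         entity_lengths[entity] = embedding_lengths[idx - 1]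
--
--     return entity_lengths
-- ===== SOURCE B (Python) =====
-- from collections import Counter
--
-- def get_embedding_lengths(triples, cutpoints, embedding_lengths):
--     counts = Counter([s for (s, _, _) in triples] + [o for (_, _, o) in triples])
--
--     # group entities by their count, preserving first-occurrence order
--     groups = {}
--     for entity, count in counts.items():
--         groups.setdefault(count, []).append(entity)
--
--     entity_lengths = {}
--     for count in sorted(groups):
--         # bucket index = number of cutpoints <= count (no sort needed for counting)
--         idx = sum(1 for c in cutpoints if c <= count)
--         length = embedding_lengths[idx - 1]
--         for entity in groups[count]:
--             entity_lengths[entity] = length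
--     return entity_lengths
-- ===== Notes on version B (the rewrite author's own statement) =====
-- stated objective: faster
-- what changed: Instead of sorting all (entity,count) pairs and re-scanning the sorted cutpoints per entity (generator scan plus list.index), B groups entities by count in a dict, iterates the distinct counts in sorted order, and computes each bucket only once per distinct count by counting cutpoints <= count.
import Mathlib
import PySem

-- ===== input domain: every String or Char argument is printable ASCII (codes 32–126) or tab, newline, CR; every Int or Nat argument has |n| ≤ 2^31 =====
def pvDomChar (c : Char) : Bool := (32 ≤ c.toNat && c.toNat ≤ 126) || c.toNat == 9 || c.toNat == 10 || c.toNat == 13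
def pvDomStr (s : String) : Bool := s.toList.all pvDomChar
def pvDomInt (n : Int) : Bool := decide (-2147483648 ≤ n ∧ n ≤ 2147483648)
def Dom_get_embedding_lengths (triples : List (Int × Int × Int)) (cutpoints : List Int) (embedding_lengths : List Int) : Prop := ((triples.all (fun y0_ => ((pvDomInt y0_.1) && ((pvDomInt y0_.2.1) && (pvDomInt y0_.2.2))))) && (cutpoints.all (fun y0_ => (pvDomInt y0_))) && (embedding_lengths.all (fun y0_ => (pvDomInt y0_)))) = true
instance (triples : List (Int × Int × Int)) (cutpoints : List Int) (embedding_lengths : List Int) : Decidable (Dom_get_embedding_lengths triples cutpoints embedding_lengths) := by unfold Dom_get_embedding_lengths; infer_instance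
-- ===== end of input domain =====

-- B replaces A's sort-all-entities-then-rescan-cutpoints-per-entity loop by grouping the entities
-- by their count in a dict and computing one bucket per DISTINCT count over the unsorted cutpoints
-- (objective: faster — one bucket computation per distinct count instead of per entity; the timing
-- run measured B faster; same return value, including dict insertion order).

-- ===== PORT A =====
-- idx = next((cutpoints.index(c) for c in cutpoints if c > count), len(cutpoints))
def pvIdxA (cut : List Int) (count : Int) : Nat :=
  match cut.find? (fun c => decide (count < c)) with
  | some c => (PySem.List.index? cut c).getD 0   -- c comes from find?, so it is present
  | none => cut.length

-- loop 'for (entity, count) in entity_counts'; none = IndexError from embedding_lengths[idx - 1]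
def pvGoA (cut : List Int) (emb : List Int) :
    PySem.Dict Int Int → List (Int × Int) → Option (PySem.Dict Int Int)
  | d, [] => some d
  | d, (entity, count) :: rest =>
    match PySem.List.pyGet? emb ((pvIdxA cut count : Int) - 1) with
    | some v => pvGoA cut emb (d.insert entity v) rest
    | none => none

def get_embedding_lengths (triples : List (Int × Int × Int)) (cutpoints : List Int) (embedding_lengths : List Int) : List (Int × Int) :=
  let entity_seq := (triples.map (fun t => t.1)) ++ (triples.map (fun t => t.2.2))
  let cut := PySem.List.sorted cutpoints (fun x => x) false
  let entity_counts := PySem.List.sorted (PySem.Dict.counter entity_seq).items (fun e => e.2) false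
  match pvGoA cut embedding_lengths PySem.Dict.empty entity_counts with
  | some d => d.items
  | none => []      -- unreachable under Pre_ (Python raises IndexError there)

-- ===== PORT B =====
-- outer loop 'for count in sorted(groups)': one bucket per distinct count;
-- none = IndexError from embedding_lengths[idx - 1]
def pvGoB (cut : List Int) (emb : List Int) (groups : PySem.Dict Int (List Int)) :
    List Int → PySem.Dict Int Int → Option (PySem.Dict Int Int)
  | [], d => some d
  | c :: cs, d =>
    -- idx = sum(1 for x in cutpoints if x <= count)
    match PySem.List.pyGet? emb ((cut.countP (fun x => decide (x ≤ c)) : Int) - 1) with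
    | some v => pvGoB cut emb groups cs ((groups.getD c []).foldl (fun d e => d.insert e v) d)
    | none => none

def get_embedding_lengths_alt (triples : List (Int × Int × Int)) (cutpoints : List Int) (embedding_lengths : List Int) : List (Int × Int) :=
  let counts := PySem.Dict.counter ((triples.map (fun t => t.1)) ++ (triples.map (fun t => t.2.2)))
  -- groups.setdefault(count, []).append(entity)
  let groups := counts.items.foldl (fun g p => g.modify p.2 [] (fun l => l ++ [p.1])) PySem.Dict.empty
  match pvGoB cutpoints embedding_lengths groups (PySem.List.sorted groups.keys (fun x => x) false) PySem.Dict.empty with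
  | some d => d.items
  | none => []      -- unreachable under Pre_ (Python raises IndexError there)

-- ===== PRECONDITION & SPEC =====
-- Pre_ excludes exactly the inputs on which Python A raises IndexError: some entity's bucket
-- index (number of cutpoints ≤ its count, minus one) is not a valid Python index of embedding_lengths.
def Pre_get_embedding_lengths (triples : List (Int × Int × Int)) (cutpoints : List Int) (embedding_lengths : List Int) : Prop :=
  ∀ e ∈ (triples.map (fun t => t.1)) ++ (triples.map (fun t => t.2.2)),
    PySem.Raise.InRange embedding_lengths.length
      ((cutpoints.countP (fun x => decide (x ≤ (((triples.map (fun t => t.1)) ++ (triples.map (fun t => t.2.2))).count e : Int))) : Int) - 1)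
instance (triples : List (Int × Int × Int)) (cutpoints : List Int) (embedding_lengths : List Int) : Decidable (Pre_get_embedding_lengths triples cutpoints embedding_lengths) := by unfold Pre_get_embedding_lengths; infer_instance

def pvWitness_get_embedding_lengths : (List (Int × Int × Int)) × List Int × List Int :=
  ([(0, 0, 1), (0, 2, 3)], [1, 2], [4, 5, 6])

def Spec_get_embedding_lengths (triples : List (Int × Int × Int)) (cutpoints : List Int) (embedding_lengths : List Int) (out : List (Int × Int)) : Prop := out = get_embedding_lengths_alt triples cutpoints embedding_lengths
instance (triples : List (Int × Int × Int)) (cutpoints : List Int) (embedding_lengths : List Int) (out : List (Int × Int)) : Decidable (Spec_get_embedding_lengths triples cutpoints embedding_lengths out) := by unfold Spec_get_embedding_lengths; infer_instance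

-- ===== CLAIM (what is proved, stated in full; the proofs are below) =====
def Claim_equal_get_embedding_lengths : Prop := ∀ (triples : List (Int × Int × Int)) (cutpoints : List Int) (embedding_lengths : List Int), Dom_get_embedding_lengths triples cutpoints embedding_lengths → Pre_get_embedding_lengths triples cutpoints embedding_lengths → Spec_get_embedding_lengths triples cutpoints embedding_lengths (get_embedding_lengths triples cutpoints embedding_lengths)

-- ===== LEMMAS AND PROOFS =====

-- the value both programs store for an entity whose count is c (getD 0 is only read under Pre_)
def pvVal (cutpoints emb : List Int) (c : Int) : Int :=
  (PySem.List.pyGet? emb ((cutpoints.countP (fun x => decide (x ≤ c)) : Int) - 1)).getD 0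

-- A's idx (first cutpoint > count, via index; else len) counts the cutpoints ≤ count, on a sorted list
theorem pvIdxA_eq_countP (cut : List Int) (count : Int) (hs : cut.Pairwise (· ≤ ·)) :
    pvIdxA cut count = cut.countP (fun x => decide (x ≤ count)) := by
  induction cut with
  | nil => simp [pvIdxA]
  | cons x t ih =>
    rcases List.pairwise_cons.mp hs with ⟨hx, ht⟩
    by_cases h : count < x
    · simp only [pvIdxA, List.find?_cons, h, decide_true]
      rw [PySem.List.index?_cons_self]
      simp only [Option.getD_some]
      rw [List.countP_cons, Eq.comm, List.countP_eq_zero.mpr]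
      · simp [not_le.mpr h]
      · intro y hy
        simpa using not_le.mpr (lt_of_lt_of_le h (hx y hy))
    · have hxc : x ≤ count := not_lt.mp h
      simp only [pvIdxA, List.find?_cons, h, decide_false]
      rw [List.countP_cons]
      simp only [hxc, decide_true, if_true]
      rw [← ih ht]
      simp only [pvIdxA]
      cases hf : t.find? (fun c => decide (count < c)) with
      | none => simp
      | some c =>
        have hct : count < c := by simpa using List.find?_some hf
        have hmem : c ∈ t := List.mem_of_find?_eq_some hf
        have hne : x ≠ c := by omega
        rcases Option.isSome_iff_exists.mp ((PySem.List.index?_isSome_iff t c).mpr hmem) with ⟨k, hk⟩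
        have h1 : PySem.List.index? (x :: t) c = some (k + 1) := by
          rw [PySem.List.index?_cons_of_ne t hne, hk]; rfl
        simp only [h1, hk, Option.getD_some]

-- A's index over the sorted cutpoints is the countP over the original cutpoints
theorem pvIdxA_sorted (cutpoints : List Int) (count : Int) :
    pvIdxA (PySem.List.sorted cutpoints (fun x => x) false) count
      = cutpoints.countP (fun x => decide (x ≤ count)) := by
  rw [pvIdxA_eq_countP _ _ (PySem.List.sorted_pairwise cutpoints (fun x => x))]
  exact (PySem.List.sorted_perm cutpoints (fun x => x) false).countP_eq _

-- A's Option loop, when no lookup fails, is a plain fold of fresh inserts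
theorem pvGoA_eq_foldl (cut emb : List Int) :
    ∀ (l : List (Int × Int)) (d : PySem.Dict Int Int),
    (∀ p ∈ l, (PySem.List.pyGet? emb ((pvIdxA cut p.2 : Int) - 1)).isSome) →
    pvGoA cut emb d l = some (l.foldl (fun d p =>
      d.insert p.1 ((PySem.List.pyGet? emb ((pvIdxA cut p.2 : Int) - 1)).getD 0)) d) := by
  intro l
  induction l with
  | nil => intro d _; rfl
  | cons hd tl ih =>
    intro d hsome
    obtain ⟨entity, count⟩ := hd
    have h0 := hsome (entity, count) (by simp)
    rcases Option.isSome_iff_exists.mp h0 with ⟨v, hv⟩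
    simp only [pvGoA, hv, List.foldl_cons]
    rw [ih _ (fun p hp => hsome p (List.mem_cons_of_mem _ hp))]
    rfl

-- B's Option loop likewise
theorem pvGoB_eq_foldl (cut emb : List Int) (groups : PySem.Dict Int (List Int)) :
    ∀ (cs : List Int) (d : PySem.Dict Int Int),
    (∀ c ∈ cs, (PySem.List.pyGet? emb ((cut.countP (fun x => decide (x ≤ c)) : Int) - 1)).isSome) →
    pvGoB cut emb groups cs d = some (cs.foldl (fun d c =>
      (groups.getD c []).foldl (fun d e => d.insert e (pvVal cut emb c)) d) d) := by
  intro cs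
  induction cs with
  | nil => intro d _; rfl
  | cons c tl ih =>
    intro d hsome
    have h0 := hsome c (by simp)
    rcases Option.isSome_iff_exists.mp h0 with ⟨v, hv⟩
    simp only [pvGoB, hv, List.foldl_cons]
    rw [ih _ (fun c hc => hsome c (List.mem_cons_of_mem _ hc))]
    simp [pvVal, hv]

-- insertBy skips a prefix it does not go before
theorem insertBy_append_not_before {α : Type} (before : α → α → Bool) (x : α) (as bs : List α)
    (h : ∀ a ∈ as, before x a = false) :
    PySem.List.insertBy before x (as ++ bs) = as ++ PySem.List.insertBy before x bs := by
  induction as with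
  | nil => simp
  | cons a as ih =>
    have ha : before x a = false := h a (by simp)
    simp only [List.cons_append, PySem.List.insertBy, ha, Bool.false_eq_true, if_false]
    rw [ih (fun a ha => h a (List.mem_cons_of_mem _ ha))]

-- insertBy goes in front when it goes before everything
theorem insertBy_forall_before {α : Type} (before : α → α → Bool) (x : α) (ys : List α)
    (h : ∀ y ∈ ys, before x y = true) :
    PySem.List.insertBy before x ys = x :: ys := by
  cases ys with
  | nil => rfl
  | cons y ys => simp [PySem.List.insertBy, h y (by simp)]

-- insertion sort consumes its input from the left: appending one element is one insertBy
theorem sorted_append_singleton {α : Type} (key : α → Int) (l : List α) (x : α) :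
    PySem.List.sorted (l ++ [x]) key false =
      PySem.List.insertBy (fun a b => decide (key a < key b)) x (PySem.List.sorted l key false) := by
  rw [PySem.List.sorted_eq_foldl_insertBy, PySem.List.sorted_eq_foldl_insertBy, List.foldl_append]
  rfl

-- STABILITY, minimum extraction: the minimal-key elements come first, in input order
theorem sorted_min_extract {α : Type} (key : α → Int) (m : Int) :
    ∀ (l : List α), (∀ p ∈ l, m ≤ key p) →
    PySem.List.sorted l key false =
      l.filter (fun p => key p == m) ++
        PySem.List.sorted (l.filter (fun p => !(key p == m))) key false := by
  intro l
  induction l using List.reverseRecOn with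
  | nil => intro _; rfl
  | append_singleton l x ih =>
    intro hmin
    have hmin' : ∀ p ∈ l, m ≤ key p := fun p hp => hmin p (by simp [hp])
    rw [sorted_append_singleton, ih hmin', List.filter_append, List.filter_append]
    have hS : ∀ s ∈ PySem.List.sorted (l.filter (fun p => !(key p == m))) key false, m < key s := by
      intro s hs
      have hs' := (PySem.List.mem_sorted _ _ _ s).mp hs
      have h1 := List.of_mem_filter hs'
      have h2 := hmin' s (List.mem_of_mem_filter hs')
      simp at h1
      omega
    by_cases hx : key x = m
    · rw [insertBy_append_not_before]
      · rw [insertBy_forall_before]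
        · simp [hx, List.append_assoc]
        · intro y hy
          simp only [decide_eq_true_eq]
          exact hx ▸ hS y hy
      · intro a ha
        have := List.of_mem_filter ha
        simp only [beq_iff_eq] at this
        simp [this, hx]
    · have hmx : m < key x := lt_of_le_of_ne (hmin x (by simp)) (fun h => hx h.symm)
      rw [insertBy_append_not_before]
      · rw [← sorted_append_singleton]
        simp [hx]
      · intro a ha
        have := List.of_mem_filter ha
        simp only [beq_iff_eq] at this
        simp only [decide_eq_false_iff_not, this]
        omega

-- STABILITY, bucket form: a stable sort by key is the concatenation of the key-buckets
-- taken in strictly increasing key order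
theorem sorted_eq_flatMap_buckets {α : Type} (key : α → Int) :
    ∀ (ks : List Int) (l : List α), ks.Pairwise (· < ·) → (∀ p ∈ l, key p ∈ ks) →
    PySem.List.sorted l key false = ks.flatMap (fun c => l.filter (fun p => key p == c)) := by
  intro ks
  induction ks with
  | nil =>
    intro l _ hcov
    have hl : l = [] := by
      cases l with
      | nil => rfl
      | cons a t => exact absurd (hcov a (by simp)) (by simp)
    subst hl; rfl
  | cons k ks ih =>
    intro l hlt hcov
    rcases List.pairwise_cons.mp hlt with ⟨hk, hks⟩
    have hmin : ∀ p ∈ l, k ≤ key p := by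
      intro p hp
      rcases List.mem_cons.mp (hcov p hp) with h | h
      · omega
      · exact le_of_lt (hk _ h)
    rw [sorted_min_extract key k l hmin, List.flatMap_cons]
    congr 1
    rw [ih (l.filter (fun p => !(key p == k))) hks]
    · unfold List.flatMap
      congr 1
      apply List.map_congr_left
      intro c hc
      have hck : k ≠ c := ne_of_lt (hk c hc)
      rw [List.filter_filter]
      apply List.filter_congr
      intro a _
      by_cases h : key a = c
      · simp [h, Ne.symm hck]
      · simp [h]
    · intro p hp
      have h1 := List.of_mem_filter hp
      have h2 := hcov p (List.mem_of_mem_filter hp)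
      simp at h1
      rcases List.mem_cons.mp h2 with h | h
      · exact absurd h h1
      · exact h

-- nested insert loops flattened to one fold over entity/value pairs
theorem foldl_foldl_insert_flat (g : Int → List Int) (v : Int → Int) :
    ∀ (cs : List Int) (d : PySem.Dict Int Int),
    cs.foldl (fun d c => (g c).foldl (fun d e => d.insert e (v c)) d) d
      = (cs.flatMap (fun c => (g c).map (fun e => (e, v c)))).foldl
          (fun d p => d.insert p.1 p.2) d := by
  intro cs
  induction cs with
  | nil => intro d; rfl
  | cons c cs ih =>
    intro d
    simp only [List.foldl_cons, List.flatMap_cons, List.foldl_append]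
    rw [ih, List.foldl_map]

-- ===== VERDICT (by name: the statement is the Claim_ definition above) =====
theorem get_embedding_lengths_spec : Claim_equal_get_embedding_lengths := by
  intro triples cutpoints emb _ hpre
  unfold Spec_get_embedding_lengths get_embedding_lengths get_embedding_lengths_alt
  dsimp only
  set seq := (triples.map (fun t => t.1)) ++ (triples.map (fun t => t.2.2)) with hseq
  set items := (PySem.Dict.counter seq).items with hitems
  set sortedCut := PySem.List.sorted cutpoints (fun x => x) false with hsc
  set sortedItems := PySem.List.sorted items (fun e => e.2) false with hsi
  -- every element of items is (k, count of k in seq) for some k ∈ seq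
  have hitems_shape : ∀ p ∈ items, p.1 ∈ seq ∧ p.2 = (seq.count p.1 : Int) := by
    intro p hp
    rw [hitems, PySem.Dict.items_counter] at hp
    rcases List.mem_map.mp hp with ⟨k, hk, rfl⟩
    exact ⟨(PySem.Set.mem_ofList seq k).mp hk, rfl⟩
  -- Pre_, restated through each port's index expression
  have hsome : ∀ p ∈ items, (PySem.List.pyGet? emb ((cutpoints.countP (fun x => decide (x ≤ p.2)) : Int) - 1)).isSome := by
    intro p hp
    rcases hitems_shape p hp with ⟨hmem, hcnt⟩
    have := hpre p.1 hmem
    rw [← hcnt] at this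
    rw [← Option.ne_none_iff_isSome]
    intro hnone
    exact (PySem.List.pyGet?_eq_none_iff _ _).mp hnone this
  -- ===== A's side =====
  have hA_some : ∀ p ∈ sortedItems, (PySem.List.pyGet? emb ((pvIdxA sortedCut p.2 : Int) - 1)).isSome := by
    intro p hp
    rw [hsc, pvIdxA_sorted]
    exact hsome p ((PySem.List.mem_sorted _ _ _ p).mp hp)
  rw [pvGoA_eq_foldl sortedCut emb sortedItems PySem.Dict.empty hA_some]
  have hfunA : (fun (d : PySem.Dict Int Int) (p : Int × Int) =>
      d.insert p.1 ((PySem.List.pyGet? emb ((pvIdxA sortedCut p.2 : Int) - 1)).getD 0))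
      = (fun d p => d.insert p.1 (pvVal cutpoints emb p.2)) := by
    funext d p
    rw [pvVal, hsc, pvIdxA_sorted]
  rw [hfunA]
  dsimp only
  -- keys of items (and of any permutation of it) are distinct
  have hmap1 : items.map (fun p => p.1) = PySem.Set.ofList seq := by
    rw [hitems, PySem.Dict.items_counter, List.map_map]
    have hcomp : ((fun p : Int × Int => p.1) ∘ fun k : Int => (k, (List.count k seq : Int))) = id := rfl
    rw [hcomp, List.map_id]
  have hNodupSorted : (sortedItems.map (fun p => p.1)).Nodup := by
    have hperm : (items.map (fun p => p.1)).Perm (sortedItems.map (fun p => p.1)) :=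
      ((PySem.List.sorted_perm items (fun e => e.2) false).map (fun p => p.1)).symm
    exact hperm.nodup (hmap1 ▸ PySem.Set.nodup_ofList seq)
  rw [PySem.Dict.items_foldl_insert_fresh sortedItems (fun p => p.1)
        (fun p => pvVal cutpoints emb p.2) PySem.Dict.empty
        (fun a _ => PySem.Dict.contains_empty _) hNodupSorted]
  -- ===== B's side =====
  set groups := items.foldl (fun g p => g.modify p.2 [] (fun l => l ++ [p.1])) PySem.Dict.empty with hgroups
  have hgroups_getD : ∀ c, groups.getD c [] = (items.filter (fun p => p.2 == c)).map (fun p => p.1) := by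
    intro c
    rw [hgroups, ← List.foldl_map (f := fun p : Int × Int => (p.2, p.1))
        (g := fun (g : PySem.Dict Int (List Int)) (q : Int × Int) => g.modify q.1 [] (fun l => l ++ [q.2]))]
    rw [PySem.Dict.getD_foldl_modify_append]
    rw [List.filter_map, List.map_map]
    rfl
  have hgroups_keys : groups.keys = PySem.Set.ofList (items.map (fun p => p.2)) := by
    rw [hgroups, PySem.Dict.keys_foldl_modify_key items (fun p => p.2) []
        (fun g p l => l ++ [p.1]) PySem.Dict.empty]
    rfl
  set ks := PySem.List.sorted groups.keys (fun x => x) false with hks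
  have hks_mem : ∀ c, c ∈ ks ↔ c ∈ items.map (fun p => p.2) := by
    intro c
    rw [hks, PySem.List.mem_sorted, hgroups_keys, PySem.Set.mem_ofList]
  have hB_some : ∀ c ∈ ks, (PySem.List.pyGet? emb ((cutpoints.countP (fun x => decide (x ≤ c)) : Int) - 1)).isSome := by
    intro c hc
    rcases List.mem_map.mp ((hks_mem c).mp hc) with ⟨p, hp, rfl⟩
    exact hsome p hp
  rw [pvGoB_eq_foldl cutpoints emb groups ks PySem.Dict.empty hB_some]
  dsimp only
  rw [foldl_foldl_insert_flat (fun c => groups.getD c []) (pvVal cutpoints emb) ks PySem.Dict.empty]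
  -- flatten B's pair list into A's mapped sorted list
  have hP : ks.flatMap (fun c => (groups.getD c []).map (fun e => (e, pvVal cutpoints emb c)))
      = sortedItems.map (fun p => (p.1, pvVal cutpoints emb p.2)) := by
    have h1 : ∀ c, (groups.getD c []).map (fun e => (e, pvVal cutpoints emb c))
        = (items.filter (fun p => p.2 == c)).map (fun p => (p.1, pvVal cutpoints emb p.2)) := by
      intro c
      rw [hgroups_getD, List.map_map]
      apply List.map_congr_left
      intro p hp
      have : p.2 = c := by simpa using List.of_mem_filter hp
      simp [this]
    calc ks.flatMap (fun c => (groups.getD c []).map (fun e => (e, pvVal cutpoints emb c)))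
        = ks.flatMap (fun c => (items.filter (fun p => p.2 == c)).map (fun p => (p.1, pvVal cutpoints emb p.2))) := by
          unfold List.flatMap
          congr 1
          exact List.map_congr_left (fun c _ => h1 c)
      _ = (ks.flatMap (fun c => items.filter (fun p => p.2 == c))).map (fun p => (p.1, pvVal cutpoints emb p.2)) := by
          rw [List.map_flatMap]
      _ = sortedItems.map (fun p => (p.1, pvVal cutpoints emb p.2)) := by
          rw [hsi, sorted_eq_flatMap_buckets (fun p : Int × Int => p.2) ks items]
          · rw [hks, hgroups_keys]
            exact PySem.List.sorted_ofList_pairwise_lt _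
          · intro p hp
            exact (hks_mem p.2).mpr (List.mem_map_of_mem hp)
  rw [hP, PySem.Dict.items_foldl_insert_fresh (sortedItems.map (fun p => (p.1, pvVal cutpoints emb p.2)))
        (fun p => p.1) (fun p => p.2) PySem.Dict.empty
        (fun a _ => PySem.Dict.contains_empty _)
        (by rw [List.map_map]; exact hNodupSorted)]
  simp
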